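-- pv_equiv track=rewrite | github.com/dakshjain-1616/AutoDoc---Autonomous-Documentation-Agent | autodoc.py | _remove_autodoc_documentation
-- ===== SOURCE A (Python) =====
-- def _remove_autodoc_documentation(content: str, language: str) -> str:
--     """Remove existing AutoDoc documentation blocks for idempotency."""
--     lines = content.split('\n')
--     cleaned = []
--     i = 0
--
--     while i < len(lines):
--         line = lines[i].strip()
--
--         if language == 'python':
--             # Marker is a standalone comment line: # @autodoc-generated
--             if line == '# @autodoc-generated':
--                 i += 1  # skip marker line
--                 # Skip the following docstring block
--                 if i < len(lines) and lines[i].strip() == '"""':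
--                     i += 1  # skip opening """
--                     while i < len(lines) and '"""' not in lines[i]:
--                         i += 1
--                     i += 1  # skip closing """
--                 continue
--
--         elif language in ['javascript', 'typescript']:
--             # Marker is @autodoc-generated inside a /** ... */ block
--             if line.startswith('/**'):
--                 # Peek ahead to see if this is an autodoc block
--                 j = i + 1
--                 is_autodoc = False
--                 while j < len(lines) and '*/' not in lines[j]:
--                     if '@autodoc-generated' in lines[j]:
--                         is_autodoc = True
--                         break
--                     j += 1
--                 if is_autodoc:
--                     # Skip until and including the closing */
--                     while i < len(lines) and '*/' not in lines[i]:
--                         i += 1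
--                     i += 1  # skip the */ line
--                     continue
--
--         elif language == 'go':
--             # Marker is the first line: // @autodoc-generated
--             if '// @autodoc-generated' in lines[i]:
--                 i += 1  # skip marker line
--                 # Skip consecutive // comment lines
--                 while i < len(lines) and lines[i].strip().startswith('//'):
--                     i += 1
--                 continue
--
--         cleaned.append(lines[i])
--         i += 1
--
--     return '\n'.join(cleaned)
-- ===== SOURCE B (Python) =====
-- def _clean_python(lines):
--     out = []
--     stack = lines[::-1]
--     while stack:
--         line = stack.pop()
--         if line.strip() == '# @autodoc-generated':
--             if stack and stack[-1].strip() == '"""':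
--                 stack.pop()
--                 while stack:
--                     body = stack.pop()
--                     if '"""' in body:
--                         break
--         else:
--             out.append(line)
--     return out
--
--
-- def _js_block_is_autodoc(stack):
--     # Peek (without consuming) at the lines after the opener, up to the first '*/'.
--     for l in reversed(stack):
--         if '*/' in l:
--             return False
--         if '@autodoc-generated' in l:
--             return True
--     return False
--
--
-- def _js_drop_block(opener, stack):
--     # Drop lines through the first one (starting with the opener) containing '*/'.
--     cur = opener
--     while '*/' not in cur and stack:
--         cur = stack.pop()
--
--
-- def _clean_js(lines):
--     out = []
--     stack = lines[::-1]
--     while stack: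
--         line = stack.pop()
--         if line.strip().startswith('/**') and _js_block_is_autodoc(stack):
--             _js_drop_block(line, stack)
--         else:
--             out.append(line)
--     return out
--
--
-- def _clean_go(lines):
--     out = []
--     stack = lines[::-1]
--     while stack:
--         line = stack.pop()
--         if '// @autodoc-generated' in line:
--             while stack and stack[-1].strip().startswith('//'):
--                 stack.pop()
--         else:
--             out.append(line)
--     return out
--
--
-- def _remove_autodoc_documentation(content: str, language: str) -> str:
--     lines = content.split('\n')
--     if language == 'python':
--         kept = _clean_python(lines)
--     elif language in ('javascript', 'typescript'):
--         kept = _clean_js(lines)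
--     elif language == 'go':
--         kept = _clean_go(lines)
--     else:
--         kept = lines
--     return '\n'.join(kept)
-- ===== Notes on version B (the rewrite author's own statement) =====
-- stated objective: alternative
-- what changed: B dispatches on the language once to three small per-language cleaners that consume the lines as a stack (with a pure look-ahead peek for JS blocks), instead of A's single indexed while-loop that re-tests the language on every line and advances an index through nested inner loops.
import Mathlib
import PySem

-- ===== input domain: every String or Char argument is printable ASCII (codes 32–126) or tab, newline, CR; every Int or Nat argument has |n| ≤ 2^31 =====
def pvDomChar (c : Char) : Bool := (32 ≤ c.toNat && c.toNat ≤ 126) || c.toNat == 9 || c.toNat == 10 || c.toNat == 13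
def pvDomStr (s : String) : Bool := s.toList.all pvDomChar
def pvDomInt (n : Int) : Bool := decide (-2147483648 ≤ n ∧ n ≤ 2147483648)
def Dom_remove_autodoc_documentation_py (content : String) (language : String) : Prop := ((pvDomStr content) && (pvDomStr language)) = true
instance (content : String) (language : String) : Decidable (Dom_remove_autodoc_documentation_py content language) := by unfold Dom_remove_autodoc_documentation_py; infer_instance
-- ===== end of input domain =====

-- B replaces A's single indexed scanner (language re-tested on every line, nested index loops)
-- by a once-per-call language dispatch to three small stack-consuming cleaners; same return value (objective: alternative).

-- ===== PORT A =====
-- A-side helpers: the inner `while` loops of A, each advancing the index i.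

-- while i < len(lines) and '"""' not in lines[i]: i += 1
def aSkipTriple (lines : List String) (i : Nat) : Nat :=
  if i < lines.length then
    if PySem.Str.isIn "\"\"\"" (lines.getD i "") then i
    else aSkipTriple lines (i + 1)
  else i
termination_by lines.length - i

theorem aSkipTriple_ge (lines : List String) (i : Nat) : i ≤ aSkipTriple lines i := by
  fun_induction aSkipTriple lines i
  all_goals omega

-- j-scan: while j < len and '*/' not in lines[j]: if '@autodoc-generated' in lines[j]: True; j += 1
def aJsScan (lines : List String) (j : Nat) : Bool :=
  if j < lines.length then
    if PySem.Str.isIn "*/" (lines.getD j "") then false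
    else if PySem.Str.isIn "@autodoc-generated" (lines.getD j "") then true
    else aJsScan lines (j + 1)
  else false
termination_by lines.length - j

-- while i < len(lines) and '*/' not in lines[i]: i += 1
def aSkipClose (lines : List String) (i : Nat) : Nat :=
  if i < lines.length then
    if PySem.Str.isIn "*/" (lines.getD i "") then i
    else aSkipClose lines (i + 1)
  else i
termination_by lines.length - i

theorem aSkipClose_ge (lines : List String) (i : Nat) : i ≤ aSkipClose lines i := by
  fun_induction aSkipClose lines i
  all_goals omega

-- while i < len(lines) and lines[i].strip().startswith('//'): i += 1
def aGoSkip (lines : List String) (i : Nat) : Nat :=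
  if i < lines.length then
    if PySem.Str.startswith (PySem.Str.strip (lines.getD i "")) "//" then aGoSkip lines (i + 1)
    else i
  else i
termination_by lines.length - i

theorem aGoSkip_ge (lines : List String) (i : Nat) : i ≤ aGoSkip lines i := by
  fun_induction aGoSkip lines i
  all_goals omega

-- the main `while i < len(lines)` loop of A, with its index i and the accumulator `cleaned`
def pyALoop (language : String) (lines : List String) (i : Nat) (cleaned : List String) : List String :=
  if i < lines.length then
    let line := PySem.Str.strip (lines.getD i "")
    if language == "python" then
      if line == "# @autodoc-generated" then
        -- i += 1; then optionally skip the docstring block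
        let i2 : Nat :=
          if decide (i + 1 < lines.length) && (PySem.Str.strip (lines.getD (i + 1) "") == "\"\"\"") then
            aSkipTriple lines (i + 2) + 1
          else i + 1
        pyALoop language lines i2 cleaned
      else pyALoop language lines (i + 1) (cleaned ++ [lines.getD i ""])
    else if language == "javascript" || language == "typescript" then
      if PySem.Str.startswith line "/**" then
        if aJsScan lines (i + 1) then pyALoop language lines (aSkipClose lines i + 1) cleaned
        else pyALoop language lines (i + 1) (cleaned ++ [lines.getD i ""])
      else pyALoop language lines (i + 1) (cleaned ++ [lines.getD i ""])
    else if language == "go" then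
      if PySem.Str.isIn "// @autodoc-generated" (lines.getD i "") then
        pyALoop language lines (aGoSkip lines (i + 1)) cleaned
      else pyALoop language lines (i + 1) (cleaned ++ [lines.getD i ""])
    else pyALoop language lines (i + 1) (cleaned ++ [lines.getD i ""])
  else cleaned
termination_by lines.length - i
decreasing_by
  all_goals
    (have h1 := aSkipTriple_ge lines (i + 2)
     have h2 := aSkipClose_ge lines i
     have h3 := aGoSkip_ge lines (i + 1)
     first
     | omega
     | (split <;> omega))

def remove_autodoc_documentation_py (content : String) (language : String) : String :=
  let lines := (PySem.Str.split? content "\n").getD []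
  PySem.Str.join "\n" (pyALoop language lines 0 [])

-- ===== PORT B =====
-- B-side helpers: three per-language cleaners consuming the list of lines front-to-back
-- (the Python B pops them from a reversed stack).

-- inner loop of _clean_python: pop until a line containing '"""' has been popped
def bDropDoc : List String → List String
  | [] => []
  | x :: xs => if PySem.Str.isIn "\"\"\"" x then xs else bDropDoc xs

theorem bDropDoc_length_le (s : List String) : (bDropDoc s).length ≤ s.length := by
  fun_induction bDropDoc s
  all_goals first
  | rfl
  | (simp only [List.length_cons]; omega)

def bCleanPy : List String → List String
  | [] => []
  | l :: stack =>
    if PySem.Str.strip l == "# @autodoc-generated" then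
      match stack with
      | [] => []
      | s0 :: rest =>
        if PySem.Str.strip s0 == "\"\"\"" then bCleanPy (bDropDoc rest)
        else bCleanPy (s0 :: rest)
    else l :: bCleanPy stack
termination_by s => s.length
decreasing_by
  · have := bDropDoc_length_le rest; simp only [List.length_cons]; omega
  · simp only [List.length_cons]; omega
  · simp only [List.length_cons]; omega

-- _js_block_is_autodoc: peek at the remaining lines up to the first '*/'
def bJsPeek : List String → Bool
  | [] => false
  | x :: xs =>
    if PySem.Str.isIn "*/" x then false
    else if PySem.Str.isIn "@autodoc-generated" x then true
    else bJsPeek xs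

-- _js_drop_block: drop lines through the first one (starting with the opener) containing '*/'
def bJsDrop : String → List String → List String
  | _, [] => []
  | cur, x :: xs => if PySem.Str.isIn "*/" cur then x :: xs else bJsDrop x xs

theorem bJsDrop_length_le (cur : String) (s : List String) : (bJsDrop cur s).length ≤ s.length := by
  fun_induction bJsDrop cur s
  all_goals first
  | rfl
  | (simp only [List.length_cons]; omega)

def bCleanJs : List String → List String
  | [] => []
  | l :: stack =>
    if PySem.Str.startswith (PySem.Str.strip l) "/**" && bJsPeek stack then
      bCleanJs (bJsDrop l stack)
    else l :: bCleanJs stack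
termination_by s => s.length
decreasing_by
  · have := bJsDrop_length_le l stack; simp only [List.length_cons]; omega
  · simp only [List.length_cons]; omega

def bCleanGo : List String → List String
  | [] => []
  | l :: stack =>
    if PySem.Str.isIn "// @autodoc-generated" l then
      bCleanGo (stack.dropWhile (fun x => PySem.Str.startswith (PySem.Str.strip x) "//"))
    else l :: bCleanGo stack
termination_by s => s.length
decreasing_by
  · have := List.length_dropWhile_le (fun x => PySem.Str.startswith (PySem.Str.strip x) "//") stack
    simp only [List.length_cons]; omega
  · simp only [List.length_cons]; omega

def remove_autodoc_documentation_py_alt (content : String) (language : String) : String :=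
  let lines := (PySem.Str.split? content "\n").getD []
  if language == "python" then PySem.Str.join "\n" (bCleanPy lines)
  else if language == "javascript" || language == "typescript" then PySem.Str.join "\n" (bCleanJs lines)
  else if language == "go" then PySem.Str.join "\n" (bCleanGo lines)
  else PySem.Str.join "\n" lines

-- ===== PRECONDITION & SPEC =====
def Spec_remove_autodoc_documentation_py (content : String) (language : String) (out : String) : Prop := out = remove_autodoc_documentation_py_alt content language
instance (content : String) (language : String) (out : String) : Decidable (Spec_remove_autodoc_documentation_py content language out) := by unfold Spec_remove_autodoc_documentation_py; infer_instance

-- ===== CLAIM (what is proved, stated in full; the proofs are below) =====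
def Claim_equal_remove_autodoc_documentation_py : Prop := ∀ (content : String) (language : String), Dom_remove_autodoc_documentation_py content language → Spec_remove_autodoc_documentation_py content language (remove_autodoc_documentation_py content language)

-- ===== LEMMAS AND PROOFS =====

theorem drop_aSkipTriple (lines : List String) (i : Nat) :
    lines.drop (aSkipTriple lines i + 1) = bDropDoc (lines.drop i) := by
  fun_induction aSkipTriple lines i with
  | case1 i h hin =>
    rw [List.getD_eq_getElem lines "" h] at hin
    rw [List.drop_eq_getElem_cons h]
    simp only [bDropDoc]
    rw [if_pos hin]
  | case2 i h hin ih =>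
    rw [List.getD_eq_getElem lines "" h] at hin
    rw [List.drop_eq_getElem_cons h]
    simp only [bDropDoc]
    rw [if_neg hin]
    exact ih
  | case3 i h =>
    rw [List.drop_eq_nil_of_le (by omega : lines.length ≤ i + 1),
        List.drop_eq_nil_of_le (by omega : lines.length ≤ i)]
    simp only [bDropDoc]

theorem aJsScan_eq_bJsPeek (lines : List String) (j : Nat) :
    aJsScan lines j = bJsPeek (lines.drop j) := by
  fun_induction aJsScan lines j with
  | case1 j h hin =>
    rw [List.getD_eq_getElem lines "" h] at hin
    rw [List.drop_eq_getElem_cons h]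
    simp only [bJsPeek]
    rw [if_pos hin]
  | case2 j h hin hmk =>
    rw [List.getD_eq_getElem lines "" h] at hin hmk
    rw [List.drop_eq_getElem_cons h]
    simp only [bJsPeek]
    rw [if_neg hin, if_pos hmk]
  | case3 j h hin hmk ih =>
    rw [List.getD_eq_getElem lines "" h] at hin hmk
    rw [List.drop_eq_getElem_cons h]
    simp only [bJsPeek]
    rw [if_neg hin, if_neg hmk]
    exact ih
  | case4 j h =>
    rw [List.drop_eq_nil_of_le (by omega : lines.length ≤ j)]
    simp only [bJsPeek]

theorem drop_aSkipClose (lines : List String) (i : Nat) (hi : i < lines.length) :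
    lines.drop (aSkipClose lines i + 1) = bJsDrop (lines.getD i "") (lines.drop (i + 1)) := by
  induction hn : lines.length - i generalizing i with
  | zero => omega
  | succ n ih =>
    rw [aSkipClose, if_pos hi]
    rw [List.getD_eq_getElem lines "" hi]
    by_cases hin : PySem.Str.isIn "*/" lines[i] = true
    · rw [if_pos hin]
      by_cases h1 : i + 1 < lines.length
      · rw [List.drop_eq_getElem_cons h1]
        simp only [bJsDrop]
        rw [if_pos hin]
      · rw [List.drop_eq_nil_of_le (by omega : lines.length ≤ i + 1)]
        simp only [bJsDrop]
    · rw [if_neg hin]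
      by_cases h1 : i + 1 < lines.length
      · rw [List.drop_eq_getElem_cons h1]
        simp only [bJsDrop]
        rw [if_neg hin]
        rw [ih (i + 1) h1 (by omega)]
        rw [List.getD_eq_getElem lines "" h1]
      · rw [List.drop_eq_nil_of_le (by omega : lines.length ≤ i + 1)]
        simp only [bJsDrop]
        rw [aSkipClose, if_neg h1]
        rw [List.drop_eq_nil_of_le (by omega : lines.length ≤ i + 1 + 1)]

theorem drop_aGoSkip (lines : List String) (i : Nat) :
    lines.drop (aGoSkip lines i) =
      (lines.drop i).dropWhile (fun x => PySem.Str.startswith (PySem.Str.strip x) "//") := by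
  fun_induction aGoSkip lines i with
  | case1 i h hsw ih =>
    rw [List.getD_eq_getElem lines "" h] at hsw
    rw [List.drop_eq_getElem_cons h, List.dropWhile_cons]
    rw [if_pos hsw]
    exact ih
  | case2 i h hsw =>
    rw [List.getD_eq_getElem lines "" h] at hsw
    conv_rhs => rw [List.drop_eq_getElem_cons h, List.dropWhile_cons]
    rw [if_neg hsw]
    rw [← List.drop_eq_getElem_cons h]
  | case3 i h =>
    rw [List.drop_eq_nil_of_le (by omega : lines.length ≤ i)]
    simp

theorem pyALoop_python (lines : List String) (n i : Nat) (cleaned : List String)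
    (hn : lines.length - i ≤ n) :
    pyALoop "python" lines i cleaned = cleaned ++ bCleanPy (lines.drop i) := by
  induction n generalizing i cleaned with
  | zero =>
    have h : lines.length ≤ i := by omega
    rw [pyALoop, if_neg (by omega), List.drop_eq_nil_of_le h, bCleanPy.eq_def]
    simp
  | succ n ih =>
    by_cases h : i < lines.length
    · rw [pyALoop, if_pos h]
      simp only [List.getD_eq_getElem lines "" h]
      rw [if_pos (beq_self_eq_true "python")]
      rw [List.drop_eq_getElem_cons h, bCleanPy.eq_def]
      dsimp only
      by_cases hm : (PySem.Str.strip lines[i] == "# @autodoc-generated") = true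
      · rw [if_pos hm, if_pos hm]
        by_cases h1 : i + 1 < lines.length
        · rw [List.drop_eq_getElem_cons h1]
          dsimp only
          by_cases hq : (PySem.Str.strip lines[i + 1] == "\"\"\"") = true
          · rw [if_pos (by simp [hq, h1]), if_pos hq]
            rw [ih _ _ (by have := aSkipTriple_ge lines (i + 2); omega)]
            rw [drop_aSkipTriple]
          · rw [if_neg (by
                simp only [decide_eq_true h1, Bool.true_and, List.getD_eq_getElem lines "" h1]
                exact hq), if_neg hq]
            rw [ih _ _ (by omega)]
            rw [List.drop_eq_getElem_cons h1]
        · have hdrop : lines.drop (i + 1) = [] :=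
            List.drop_eq_nil_of_le (by omega : lines.length ≤ i + 1)
          rw [hdrop]
          dsimp only
          rw [if_neg (by simp [h1])]
          rw [ih _ _ (by omega), hdrop]
          rw [bCleanPy.eq_def]
      · rw [if_neg hm, if_neg hm]
        rw [ih _ _ (by omega)]
        simp
    · have hle : lines.length ≤ i := by omega
      rw [pyALoop, if_neg (by omega), List.drop_eq_nil_of_le hle, bCleanPy.eq_def]
      simp

theorem pyALoop_js (language : String) (lines : List String) (n i : Nat) (cleaned : List String)
    (hp : (language == "python") = false)
    (hjs : (language == "javascript" || language == "typescript") = true)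
    (hn : lines.length - i ≤ n) :
    pyALoop language lines i cleaned = cleaned ++ bCleanJs (lines.drop i) := by
  induction n generalizing i cleaned with
  | zero =>
    have h : lines.length ≤ i := by omega
    rw [pyALoop, if_neg (by omega), List.drop_eq_nil_of_le h, bCleanJs.eq_def]
    simp
  | succ n ih =>
    by_cases h : i < lines.length
    · rw [pyALoop, if_pos h]
      simp only [List.getD_eq_getElem lines "" h, hp, Bool.false_eq_true, if_false]
      rw [if_pos hjs]
      rw [List.drop_eq_getElem_cons h, bCleanJs.eq_def]
      dsimp only
      by_cases hsw : (PySem.Str.startswith (PySem.Str.strip lines[i]) "/**") = true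
      · rw [if_pos hsw]
        rw [aJsScan_eq_bJsPeek]
        by_cases hpk : bJsPeek (lines.drop (i + 1)) = true
        · rw [if_pos hpk]
          rw [if_pos (show (PySem.Str.startswith (PySem.Str.strip lines[i]) "/**" && bJsPeek (lines.drop (i + 1))) = true by rw [hsw, hpk]; rfl)]
          rw [ih _ _ (by have := aSkipClose_ge lines i; omega)]
          rw [drop_aSkipClose lines i h, List.getD_eq_getElem lines "" h]
        · rw [if_neg hpk]
          rw [if_neg (fun hc => hpk (Bool.and_elim_right (of_eq_true (eq_true hc))))]
          rw [ih _ _ (by omega)]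
          simp
      · rw [if_neg hsw]
        rw [if_neg (fun hc => hsw (Bool.and_elim_left (of_eq_true (eq_true hc))))]
        rw [ih _ _ (by omega)]
        simp
    · have hle : lines.length ≤ i := by omega
      rw [pyALoop, if_neg (by omega), List.drop_eq_nil_of_le hle, bCleanJs.eq_def]
      simp

theorem pyALoop_go (lines : List String) (n i : Nat) (cleaned : List String)
    (hn : lines.length - i ≤ n) :
    pyALoop "go" lines i cleaned = cleaned ++ bCleanGo (lines.drop i) := by
  induction n generalizing i cleaned with
  | zero =>
    have h : lines.length ≤ i := by omega
    rw [pyALoop, if_neg (by omega), List.drop_eq_nil_of_le h, bCleanGo.eq_def]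
    simp
  | succ n ih =>
    by_cases h : i < lines.length
    · rw [pyALoop, if_pos h]
      simp only [List.getD_eq_getElem lines "" h]
      rw [if_neg (by decide), if_neg (by decide), if_pos (by decide : ("go" == "go") = true)]
      rw [List.drop_eq_getElem_cons h, bCleanGo.eq_def]
      dsimp only
      by_cases hmk : (PySem.Str.isIn "// @autodoc-generated" lines[i]) = true
      · rw [if_pos hmk, if_pos hmk]
        rw [ih _ _ (by have := aGoSkip_ge lines (i + 1); omega)]
        rw [drop_aGoSkip]
      · rw [if_neg hmk, if_neg hmk]
        rw [ih _ _ (by omega)]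
        simp
    · have hle : lines.length ≤ i := by omega
      rw [pyALoop, if_neg (by omega), List.drop_eq_nil_of_le hle, bCleanGo.eq_def]
      simp

theorem pyALoop_other (language : String) (lines : List String) (n i : Nat) (cleaned : List String)
    (hp : (language == "python") = false)
    (hjs : (language == "javascript" || language == "typescript") = false)
    (hgo : (language == "go") = false)
    (hn : lines.length - i ≤ n) :
    pyALoop language lines i cleaned = cleaned ++ lines.drop i := by
  induction n generalizing i cleaned with
  | zero =>
    have h : lines.length ≤ i := by omega
    rw [pyALoop, if_neg (by omega), List.drop_eq_nil_of_le h]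
    simp
  | succ n ih =>
    by_cases h : i < lines.length
    · rw [pyALoop, if_pos h]
      simp only [List.getD_eq_getElem lines "" h, hp, hjs, hgo, Bool.false_eq_true, if_false]
      rw [ih _ _ (by omega)]
      rw [List.drop_eq_getElem_cons h]
      simp
    · have hle : lines.length ≤ i := by omega
      rw [pyALoop, if_neg (by omega), List.drop_eq_nil_of_le hle]
      simp

-- ===== VERDICT (by name: the statement is the Claim_ definition above) =====
theorem remove_autodoc_documentation_py_spec : Claim_equal_remove_autodoc_documentation_py := by
  intro content language _
  unfold Spec_remove_autodoc_documentation_py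
  unfold remove_autodoc_documentation_py remove_autodoc_documentation_py_alt
  dsimp only
  generalize (PySem.Str.split? content "\n").getD [] = lines
  by_cases hp : (language == "python") = true
  · have hL : language = "python" := by simpa using hp
    subst hL
    rw [if_pos hp]
    rw [pyALoop_python lines lines.length 0 [] (by omega)]
    simp
  · have hp' : (language == "python") = false := by simpa using hp
    by_cases hjs : (language == "javascript" || language == "typescript") = true
    · rw [if_neg hp, if_pos hjs]
      rw [pyALoop_js language lines lines.length 0 [] hp' hjs (by omega)]
      simp
    · have hjs' : (language == "javascript" || language == "typescript") = false := by
        simpa using hjs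
      by_cases hgo : (language == "go") = true
      · have hL : language = "go" := by simpa using hgo
        subst hL
        rw [if_neg hp, if_neg hjs, if_pos hgo]
        rw [pyALoop_go lines lines.length 0 [] (by omega)]
        simp
      · have hgo' : (language == "go") = false := by simpa using hgo
        rw [if_neg hp, if_neg hjs, if_neg hgo]
        rw [pyALoop_other language lines lines.length 0 [] hp' hjs' hgo' (by omega)]
        simp
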